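-- pv_equiv track=rewrite | github.com/YevheniiShcherbinin/pythonTasks | date.py | daycheck
-- ===== SOURCE A (Python) =====
-- def daycheck(month, day):
--     monthlist1 = [1, 3, 5, 7, 8, 10, 12]
--     monthlist2 = [4, 6, 9, 11]
--     monthlist3 = 2
--
--     for mon in monthlist1:
--         if month == mon:
--             if day >= 1 and day <= 31:
--                 return True
--             else:
--                 return False
--
--     for mon in monthlist2:
--         if month == mon:
--             if day >= 1 and day <= 30:
--                 return True
--             else:
--                 return False
--
--     if month == monthlist3:
--         if day >= 1 and day <= 28:
--             return True
--         else:
--             return False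
-- ===== SOURCE B (Python) =====
-- def daycheck(month, day):
--     if 1 <= month <= 12:
--         upper = 28 if month == 2 else 30 + (month + month // 8) % 2
--         return 1 <= day <= upper
-- ===== Notes on version B (the rewrite author's own statement) =====
-- stated objective: simpler
-- what changed: Replaces the list scans and per-list bound branches with an arithmetic closed form: for months 1..12 the maximum day is 28 for February and otherwise 30 + (month + month // 8) % 2, checked by one comparison; no lookup table or scan at all.
-- outside the precondition, e.g. on daycheck(13, 5): A returns None, B returns None
import Mathlib
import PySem

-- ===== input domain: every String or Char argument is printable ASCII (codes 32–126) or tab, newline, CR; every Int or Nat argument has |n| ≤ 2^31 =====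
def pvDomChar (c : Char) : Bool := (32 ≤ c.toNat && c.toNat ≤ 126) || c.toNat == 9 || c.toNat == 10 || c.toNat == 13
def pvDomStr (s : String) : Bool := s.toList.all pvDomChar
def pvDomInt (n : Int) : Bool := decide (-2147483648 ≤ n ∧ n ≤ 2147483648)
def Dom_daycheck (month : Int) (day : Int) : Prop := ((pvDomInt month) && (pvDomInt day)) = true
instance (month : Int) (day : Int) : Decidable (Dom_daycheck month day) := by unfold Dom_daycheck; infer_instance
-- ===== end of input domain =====

-- B replaces A's list scans and hard-coded bound branches with an arithmetic closed form for the month's maximum day (simpler).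


-- ===== PORT A =====
-- the 'for mon in monthlist: if month == mon: return (1 <= day <= bound)' loop,
-- as a structural recursion over the list; none = loop fell through
def daycheckScan (ms : List Int) (month : Int) (day : Int) (bound : Int) : Option Bool :=
  match ms with
  | [] => none
  | mon :: rest =>
    if month == mon then
      some (if day ≥ 1 && day ≤ bound then true else false)
    else daycheckScan rest month day bound

def daycheck (month : Int) (day : Int) : Bool :=
  let monthlist1 : List Int := [1, 3, 5, 7, 8, 10, 12]
  let monthlist2 : List Int := [4, 6, 9, 11]
  let monthlist3 : Int := 2
  match daycheckScan monthlist1 month day 31 with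
  | some b => b
  | none =>
    match daycheckScan monthlist2 month day 30 with
    | some b => b
    | none =>
      if month == monthlist3 then
        (if day ≥ 1 && day ≤ 28 then true else false)
      else false  -- Python returns None here; excluded by Pre_daycheck

-- ===== PORT B =====
-- closed form: Feb -> 28, otherwise 30 + (month + month // 8) % 2 (Python floordiv/mod)
def daycheck_alt (month : Int) (day : Int) : Bool :=
  if 1 ≤ month ∧ month ≤ 12 then
    let upper : Int :=
      if month == 2 then 28
      else 30 + PySem.Int.mod (month + PySem.Int.floordiv month 8) 2
    decide (1 ≤ day) && decide (day ≤ upper)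
  else false  -- Python returns None here; excluded by Pre_daycheck

-- ===== PRECONDITION & SPEC =====
-- Pre_ excludes months outside 1..12: there A (and B) return None, not a bool.
def Pre_daycheck (month : Int) (day : Int) : Prop := 1 ≤ month ∧ month ≤ 12
instance (month : Int) (day : Int) : Decidable (Pre_daycheck month day) := by unfold Pre_daycheck; infer_instance
def pvWitness_daycheck : Int × Int := (7, 15)
def Spec_daycheck (month : Int) (day : Int) (out : Bool) : Prop := out = daycheck_alt month day
instance (month : Int) (day : Int) (out : Bool) : Decidable (Spec_daycheck month day out) := by unfold Spec_daycheck; infer_instance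

-- ===== CLAIM =====
def Claim_equal_daycheck : Prop := ∀ (month : Int) (day : Int), Dom_daycheck month day → Pre_daycheck month day → Spec_daycheck month day (daycheck month day)

-- ===== LEMMAS AND PROOFS =====

-- ===== VERDICT =====
theorem daycheck_spec : Claim_equal_daycheck := by
  unfold Claim_equal_daycheck
  intro month day _ hpre
  unfold Spec_daycheck daycheck daycheck_alt
  obtain ⟨h1, h2⟩ := hpre
  interval_cases month <;>
    simp [daycheckScan, ge_iff_le, PySem.Int.mod, PySem.Int.floordiv]
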